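-- pv_equiv track=rewrite | github.com/lawanfalalu/class_exercises | 40527_A1.py | recursion
-- ===== SOURCE A (Python) =====
-- def det_2_by_2(matrix):
--     return matrix[0][0]*matrix[1][1]-matrix[1][0]*matrix[0][1]
--
-- def recursion(matrix,somme=None,prod=1):
--     if(somme==None):
--         somme=[]
--     if(len(matrix)==1):
--         somme.append(matrix[0][0])
--     elif(len(matrix)==2):
--         somme.append(det_2_by_2(matrix)*prod)
--     else:
--         for index, elmt in enumerate(matrix[0]):
--             transposee = [list(a) for a in zip(*matrix[1:])]
--             del transposee[index]
--             mineur = [list(a) for a in zip(*transposee)]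
--             somme = recursion(mineur,somme,prod*matrix[0][index]*(-1)**(index+2))
--     return somme
-- ===== SOURCE B (Python) =====
-- # B: iterative cofactor expansion with an explicit DFS stack instead of tree recursion.
-- # Return-value equivalence; on returning inputs it mutates a caller-supplied somme identically to A.
-- def det_2_by_2(matrix):
--     return matrix[0][0]*matrix[1][1]-matrix[1][0]*matrix[0][1]
--
-- def recursion(matrix, somme=None, prod=1):
--     if somme is None:
--         somme = []
--     stack = [(matrix, prod)]
--     while stack:
--         m, p = stack.pop()
--         if len(m) == 1:
--             somme.append(m[0][0])
--         elif len(m) == 2: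
--             somme.append(det_2_by_2(m) * p)
--         else:
--             children = []
--             for i, e in enumerate(m[0]):
--                 t = [list(a) for a in zip(*m[1:])]
--                 del t[i]
--                 mi = [list(a) for a in zip(*t)]
--                 children.append((mi, p * e * (-1) ** (i + 2)))
--             stack.extend(reversed(children))
--     return somme
-- ===== Notes on version B (the rewrite author's own statement) =====
-- stated objective: alternative
-- what changed: Replaces A's tree recursion (recursive calls threading the somme accumulator through each cofactor) with an iterative DFS over an explicit stack of (submatrix, prod) entries, pushing the minors of the first row in reverse so terms are appended in the same order.
import Mathlib
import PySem

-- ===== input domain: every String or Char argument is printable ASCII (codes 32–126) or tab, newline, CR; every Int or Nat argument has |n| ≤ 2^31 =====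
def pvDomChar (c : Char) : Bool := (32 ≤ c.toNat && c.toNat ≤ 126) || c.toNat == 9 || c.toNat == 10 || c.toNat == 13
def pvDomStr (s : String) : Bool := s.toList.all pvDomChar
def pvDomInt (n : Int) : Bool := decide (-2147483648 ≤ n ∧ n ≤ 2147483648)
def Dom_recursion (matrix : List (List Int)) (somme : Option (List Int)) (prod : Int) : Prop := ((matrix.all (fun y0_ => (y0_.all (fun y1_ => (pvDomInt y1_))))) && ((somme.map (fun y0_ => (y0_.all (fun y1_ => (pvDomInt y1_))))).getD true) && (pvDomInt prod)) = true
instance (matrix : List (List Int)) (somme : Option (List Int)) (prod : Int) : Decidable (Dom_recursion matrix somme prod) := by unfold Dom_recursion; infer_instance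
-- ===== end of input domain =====

-- B replaces A's tree recursion by an iterative DFS over an explicit stack of (submatrix, prod)
-- entries (objective: alternative decomposition, same cost). Return-value equivalence; on
-- returning inputs both also mutate a caller-supplied somme list identically.

-- ===== PORT A =====
-- shared helpers modelling Python's zip-based transpose: zip(*rows) truncates to the minimum row length
def pyMinLen (rows : List (List Int)) : Nat :=
  match rows with
  | [] => 0
  | r :: rs => rs.foldl (fun a b => min a b.length) r.length

def pyTranspose (rows : List (List Int)) : List (List Int) :=
  (List.range (pyMinLen rows)).map (fun i => rows.map (fun r => r.getD i 0))

-- matrix[0][0]*matrix[1][1]-matrix[1][0]*matrix[0][1]; Python raises IndexError on missing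
-- entries (excluded by Pre_), the port reads a default 0 there
def det_2_by_2 (matrix : List (List Int)) : Int :=
  ((matrix.getD 0 []).getD 0 0) * ((matrix.getD 1 []).getD 1 0)
    - ((matrix.getD 1 []).getD 0 0) * ((matrix.getD 0 []).getD 1 0)

-- transposee = zip(*matrix[1:]); del transposee[index]; mineur = zip(*transposee)
-- (Python's del raises when index is out of range — excluded by Pre_; eraseIdx is then a no-op)
def pyMineur (matrix : List (List Int)) (i : Nat) : List (List Int) :=
  pyTranspose ((pyTranspose (matrix.drop 1)).eraseIdx i)

-- one call of A's recursion (with somme already a list); the first Nat is structural fuel that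
-- only makes the recursion total — recursion below supplies matrix.length + 1, which always
-- suffices because each minor has strictly fewer rows (recGoN_congr below)
def recGoN : Nat → List (List Int) → List Int → Int → List Int
  | 0, _, s, _ => s
  | b + 1, matrix, s, prod =>
      if matrix.length = 1 then s ++ [(matrix.headD []).headD 0]
      else if matrix.length = 2 then s ++ [det_2_by_2 matrix * prod]
      else
        match matrix with
        | [] => s        -- Python raises IndexError on matrix[0] here (excluded by Pre_)
        | r :: tl =>     -- for index, elmt in enumerate(matrix[0]): somme = recursion(mineur, somme, …)
            (List.range r.length).foldl
              (fun a i => recGoN b (pyMineur (r :: tl) i) a (prod * r.getD i 0 * (-1 : Int) ^ (i + 2))) s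

def recursion (matrix : List (List Int)) (somme : Option (List Int)) (prod : Int) : List Int :=
  recGoN (matrix.length + 1) matrix (somme.getD []) prod

-- ===== PORT B =====
-- max row length; only used to compute a sufficient fuel for the stack loop
def wMax (rows : List (List Int)) : Nat := rows.foldl (fun a r => max a r.length) 0

def entryW (e : List (List Int) × Int) : Nat := (wMax e.1 + 2) ^ e.1.length

-- the while-stack loop of B: pop an entry, append a term for the two base cases, otherwise
-- push the children (minors) in ascending column order; the Nat is structural fuel that only
-- makes the loop total — entryW of the initial entry strictly bounds the number of iterations
-- (children_stackW_lt below)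
def loopBN : Nat → List (List (List Int) × Int) → List Int → List Int
  | 0, _, acc => acc
  | _ + 1, [], acc => acc
  | b + 1, (m, p) :: rest, acc =>
      if m.length = 1 then loopBN b rest (acc ++ [(m.headD []).headD 0])
      else if m.length = 2 then loopBN b rest (acc ++ [det_2_by_2 m * p])
      else
        match m with
        | [] => loopBN b rest acc   -- Python raises IndexError on m[0] here (excluded by Pre_)
        | r :: tl =>
            loopBN b (((List.range r.length).map
              (fun i => (pyMineur (r :: tl) i, p * r.getD i 0 * (-1 : Int) ^ (i + 2)))) ++ rest) acc

def recursion_alt (matrix : List (List Int)) (somme : Option (List Int)) (prod : Int) : List Int :=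
  loopBN (entryW (matrix, prod) + 1) [(matrix, prod)] (somme.getD [])

-- ===== PRECONDITION & SPEC =====
-- Pre_ = exactly the inputs on which Python A returns; elsewhere A raises IndexError
-- (empty matrix, too-short rows of a 1- or 2-row matrix, or — for 3+ rows with a nonempty
-- first row — row 0 wider than the zip-truncated transpose or a minor chain that bottoms out).
def Pre_recursion (matrix : List (List Int)) (_somme : Option (List Int)) (_prod : Int) : Prop :=
  if matrix.length = 0 then False
  else if matrix.length = 1 then 1 ≤ (matrix.headD []).length
  else if matrix.length = 2 then 2 ≤ (matrix.headD []).length ∧ 2 ≤ (matrix.getD 1 []).length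
  else (matrix.headD []).length = 0 ∨
    ((matrix.headD []).length ≤ pyMinLen (matrix.drop 1) ∧ matrix.length ≤ pyMinLen (matrix.drop 1))

instance (matrix : List (List Int)) (somme : Option (List Int)) (prod : Int) : Decidable (Pre_recursion matrix somme prod) := by unfold Pre_recursion; infer_instance

def pvWitness_recursion : List (List Int) × Option (List Int) × Int := ([[1, 2], [3, 4]], none, 1)

def Spec_recursion (matrix : List (List Int)) (somme : Option (List Int)) (prod : Int) (out : List Int) : Prop := out = recursion_alt matrix somme prod
instance (matrix : List (List Int)) (somme : Option (List Int)) (prod : Int) (out : List Int) : Decidable (Spec_recursion matrix somme prod out) := by unfold Spec_recursion; infer_instance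

-- ===== CLAIM (what is proved, stated in full; the proofs are below) =====
def Claim_equal_recursion : Prop := ∀ (matrix : List (List Int)) (somme : Option (List Int)) (prod : Int), Dom_recursion matrix somme prod → Pre_recursion matrix somme prod → Spec_recursion matrix somme prod (recursion matrix somme prod)

-- ===== LEMMAS AND PROOFS =====

def stackW (st : List (List (List Int) × Int)) : Nat := (st.map entryW).sum

theorem foldl_min_le_init (l : List (List Int)) (a : Nat) :
    l.foldl (fun a b => min a b.length) a ≤ a := by
  induction l generalizing a with
  | nil => simp
  | cons y ys ih => exact le_trans (ih _) (min_le_left _ _)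

theorem pyMinLen_cons_le (x : List Int) (xs : List (List Int)) : pyMinLen (x :: xs) ≤ x.length :=
  foldl_min_le_init xs x.length

theorem pyTranspose_mem_length {x : List Int} {rows : List (List Int)} (hx : x ∈ pyTranspose rows) :
    x.length = rows.length := by
  unfold pyTranspose at hx
  obtain ⟨i, _, rfl⟩ := List.mem_map.1 hx
  simp

theorem pyTranspose_length (rows : List (List Int)) : (pyTranspose rows).length = pyMinLen rows := by
  simp [pyTranspose]

theorem pyMineur_length_le (matrix : List (List Int)) (i : Nat) :
    (pyMineur matrix i).length ≤ matrix.length - 1 := by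
  unfold pyMineur
  rw [pyTranspose_length]
  cases hys : (pyTranspose (matrix.drop 1)).eraseIdx i with
  | nil => simp [pyMinLen]
  | cons y ys =>
      have hy : y ∈ pyTranspose (matrix.drop 1) := by
        apply List.mem_of_mem_eraseIdx (i := i); rw [hys]; simp
      have hlen := pyTranspose_mem_length hy
      calc pyMinLen (y :: ys) ≤ y.length := pyMinLen_cons_le y ys
        _ ≤ matrix.length - 1 := by rw [hlen]; simp

theorem foldl_max_init_le (l : List (List Int)) {a b : Nat} (h : a ≤ b) :
    a ≤ l.foldl (fun x r => max x r.length) b := by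
  induction l generalizing b with
  | nil => simpa using h
  | cons y ys ih => exact ih (le_trans h (le_max_left _ _))

theorem wMax_mem_le {x : List Int} {rows : List (List Int)} (hx : x ∈ rows) :
    x.length ≤ wMax rows := by
  unfold wMax
  have h : ∀ (l : List (List Int)) (a : Nat), x ∈ l → x.length ≤ l.foldl (fun a r => max a r.length) a := by
    intro l
    induction l with
    | nil => intro a hmem; simp at hmem
    | cons y ys ih =>
        intro a hmem
        rcases List.mem_cons.1 hmem with heq | hmem'
        · subst heq; exact foldl_max_init_le ys (le_max_right _ _)
        · exact ih _ hmem'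
  exact h rows 0 hx

theorem foldl_max_le (l : List (List Int)) {a B : Nat} (ha : a ≤ B)
    (h : ∀ x ∈ l, x.length ≤ B) : l.foldl (fun x r => max x r.length) a ≤ B := by
  induction l generalizing a with
  | nil => simpa using ha
  | cons y ys ih =>
      exact ih (max_le ha (h y (by simp))) (fun x hx => h x (by simp [hx]))

theorem wMax_le_of_forall {rows : List (List Int)} {B : Nat}
    (h : ∀ x ∈ rows, x.length ≤ B) : wMax rows ≤ B :=
  foldl_max_le rows (Nat.zero_le B) h

theorem wMax_mineur_le (r : List Int) (tl : List (List Int)) (i : Nat) :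
    wMax (pyMineur (r :: tl) i) ≤ wMax (r :: tl) := by
  apply wMax_le_of_forall
  intro x hx
  have hxl := pyTranspose_mem_length hx
  have h1 : ((pyTranspose tl).eraseIdx i).length ≤ (pyTranspose tl).length :=
    List.length_eraseIdx_le _ _
  rw [pyTranspose_length] at h1
  have h2 : pyMinLen tl ≤ wMax (r :: tl) := by
    cases tl with
    | nil => simp [pyMinLen]
    | cons t ts =>
        exact le_trans (pyMinLen_cons_le t ts) (wMax_mem_le (by simp))
  simp only [List.drop_succ_cons, List.drop_zero] at hxl
  omega

theorem entryW_pos (e : List (List Int) × Int) : 1 ≤ entryW e :=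
  Nat.one_le_pow _ _ (by omega)

theorem children_stackW_lt (r : List Int) (tl : List (List Int)) (p : Int) :
    stackW ((List.range r.length).map
      (fun i => (pyMineur (r :: tl) i, p * r.getD i 0 * (-1 : Int) ^ (i + 2)))) <
    entryW (r :: tl, p) := by
  have hbound : ∀ i : Nat, entryW (pyMineur (r :: tl) i, p * r.getD i 0 * (-1 : Int) ^ (i + 2))
      ≤ (wMax (r :: tl) + 2) ^ tl.length := by
    intro i
    have hml : (pyMineur (r :: tl) i).length ≤ tl.length := by
      have := pyMineur_length_le (r :: tl) i; simpa using this
    have hmw : wMax (pyMineur (r :: tl) i) ≤ wMax (r :: tl) := wMax_mineur_le r tl i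
    calc entryW (pyMineur (r :: tl) i, p * r.getD i 0 * (-1 : Int) ^ (i + 2))
        = (wMax (pyMineur (r :: tl) i) + 2) ^ (pyMineur (r :: tl) i).length := rfl
      _ ≤ (wMax (r :: tl) + 2) ^ (pyMineur (r :: tl) i).length :=
          Nat.pow_le_pow_left (by omega) _
      _ ≤ (wMax (r :: tl) + 2) ^ tl.length := Nat.pow_le_pow_right (by omega) hml
  have hsum : stackW ((List.range r.length).map
      (fun i => (pyMineur (r :: tl) i, p * r.getD i 0 * (-1 : Int) ^ (i + 2))))
      ≤ r.length * (wMax (r :: tl) + 2) ^ tl.length := by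
    unfold stackW
    rw [List.map_map]
    have := List.sum_le_card_nsmul
      ((List.range r.length).map
        ((fun e => entryW e) ∘ (fun i => (pyMineur (r :: tl) i, p * r.getD i 0 * (-1 : Int) ^ (i + 2)))))
      ((wMax (r :: tl) + 2) ^ tl.length)
      (by intro x hx; obtain ⟨i, _, rfl⟩ := List.mem_map.1 hx; exact hbound i)
    simpa using this
  have hw : r.length ≤ wMax (r :: tl) := wMax_mem_le (by simp)
  have hpow : 1 ≤ (wMax (r :: tl) + 2) ^ tl.length := Nat.one_le_pow _ _ (by omega)
  have hstep : entryW (r :: tl, p) = (wMax (r :: tl) + 2) ^ tl.length * (wMax (r :: tl) + 2) := by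
    simp [entryW]; ring
  have : r.length * (wMax (r :: tl) + 2) ^ tl.length
      < (wMax (r :: tl) + 2) ^ tl.length * (wMax (r :: tl) + 2) := by
    calc r.length * (wMax (r :: tl) + 2) ^ tl.length
        ≤ wMax (r :: tl) * (wMax (r :: tl) + 2) ^ tl.length := Nat.mul_le_mul_right _ hw
      _ < (wMax (r :: tl) + 2) * (wMax (r :: tl) + 2) ^ tl.length := by
          exact mul_lt_mul_of_pos_right (by omega) (by positivity)
      _ = (wMax (r :: tl) + 2) ^ tl.length * (wMax (r :: tl) + 2) := by ring
  omega

theorem foldl_congr_fun {α β : Type} (l : List β) (f g : α → β → α) (a : α)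
    (h : ∀ x ∈ l, ∀ acc, f acc x = g acc x) : l.foldl f a = l.foldl g a := by
  induction l generalizing a with
  | nil => rfl
  | cons x xs ih => simp only [List.foldl_cons, h x (by simp)]; exact ih _ (fun y hy acc => h y (by simp [hy]) acc)

-- fuel irrelevance for A's recursion: any fuel above the row count computes the same value
theorem recGoN_congr : ∀ (b b' : Nat) (m : List (List Int)) (s : List Int) (p : Int),
    m.length < b → m.length < b' → recGoN b m s p = recGoN b' m s p := by
  intro b
  induction b with
  | zero => intro b' m s p h; omega
  | succ b ih =>
      intro b' m s p h h'
      cases b' with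
      | zero => omega
      | succ b'' =>
          simp only [recGoN]
          by_cases h1 : m.length = 1
          · simp [h1]
          · by_cases h2 : m.length = 2
            · simp [h2]
            · simp only [h1, h2, if_false]
              cases m with
              | nil => rfl
              | cons r tl =>
                  apply foldl_congr_fun
                  intro i _ acc
                  have hml : (pyMineur (r :: tl) i).length ≤ tl.length := by
                    have := pyMineur_length_le (r :: tl) i; simpa using this
                  have hlt : (pyMineur (r :: tl) i).length < b := by
                    simp only [List.length_cons] at h; omega
                  have hlt' : (pyMineur (r :: tl) i).length < b'' := by
                    simp only [List.length_cons] at h'; omega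
                  exact ih b'' _ acc _ hlt hlt'

theorem stackW_cons (e : List (List Int) × Int) (rest : List (List (List Int) × Int)) :
    stackW (e :: rest) = entryW e + stackW rest := by
  simp [stackW]

theorem recGoN_one {m : List (List Int)} (h : m.length = 1) (b : Nat) (s : List Int) (p : Int) :
    recGoN (b + 1) m s p = s ++ [(m.headD []).headD 0] := by
  simp [recGoN, h]

theorem recGoN_two {m : List (List Int)} (h : m.length = 2) (b : Nat) (s : List Int) (p : Int) :
    recGoN (b + 1) m s p = s ++ [det_2_by_2 m * p] := by
  simp [recGoN, h]

theorem recGoN_nil (b : Nat) (s : List Int) (p : Int) : recGoN (b + 1) [] s p = s := by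
  simp [recGoN]

theorem recGoN_big {r : List Int} {tl : List (List Int)} (h1 : ¬ (r :: tl).length = 1)
    (h2 : ¬ (r :: tl).length = 2) (b : Nat) (s : List Int) (p : Int) :
    recGoN (b + 1) (r :: tl) s p =
      (List.range r.length).foldl
        (fun a i => recGoN b (pyMineur (r :: tl) i) a (p * r.getD i 0 * (-1 : Int) ^ (i + 2))) s := by
  simp only [recGoN, h1, h2, if_false]

theorem loopBN_one {m : List (List Int)} (h : m.length = 1) (b : Nat) (p : Int)
    (rest : List (List (List Int) × Int)) (acc : List Int) :
    loopBN (b + 1) ((m, p) :: rest) acc = loopBN b rest (acc ++ [(m.headD []).headD 0]) := by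
  simp [loopBN, h]

theorem loopBN_two {m : List (List Int)} (h : m.length = 2) (b : Nat) (p : Int)
    (rest : List (List (List Int) × Int)) (acc : List Int) :
    loopBN (b + 1) ((m, p) :: rest) acc = loopBN b rest (acc ++ [det_2_by_2 m * p]) := by
  simp [loopBN, h]

theorem loopBN_nil (b : Nat) (p : Int) (rest : List (List (List Int) × Int)) (acc : List Int) :
    loopBN (b + 1) (([], p) :: rest) acc = loopBN b rest acc := by
  simp [loopBN]

theorem loopBN_big {r : List Int} {tl : List (List Int)} (h1 : ¬ (r :: tl).length = 1)
    (h2 : ¬ (r :: tl).length = 2) (b : Nat) (p : Int)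
    (rest : List (List (List Int) × Int)) (acc : List Int) :
    loopBN (b + 1) ((r :: tl, p) :: rest) acc =
      loopBN b (((List.range r.length).map
        (fun i => (pyMineur (r :: tl) i, p * r.getD i 0 * (-1 : Int) ^ (i + 2)))) ++ rest) acc := by
  simp only [loopBN, h1, h2, if_false]

-- B's stack loop, with enough fuel, folds A's recursion over the stack entries in order
theorem loopBN_eq_foldl : ∀ (b : Nat) (st : List (List (List Int) × Int)) (acc : List Int),
    stackW st < b →
    loopBN b st acc = st.foldl (fun a e => recGoN (e.1.length + 1) e.1 a e.2) acc := by
  intro b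
  induction b with
  | zero => intro st acc h; omega
  | succ b ih =>
      intro st acc h
      cases st with
      | nil => rfl
      | cons e rest =>
          obtain ⟨m, p⟩ := e
          rw [stackW_cons] at h
          have hpos := entryW_pos (m, p)
          simp only [List.foldl_cons]
          by_cases h1 : m.length = 1
          · rw [loopBN_one h1, recGoN_one h1, ih rest _ (by omega)]
          · by_cases h2 : m.length = 2
            · rw [loopBN_two h2, recGoN_two h2, ih rest _ (by omega)]
            · cases m with
              | nil => rw [loopBN_nil, recGoN_nil, ih rest _ (by omega)]
              | cons r tl =>
                  have hch := children_stackW_lt r tl p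
                  have hsplit : stackW (((List.range r.length).map
                      (fun i => (pyMineur (r :: tl) i, p * r.getD i 0 * (-1 : Int) ^ (i + 2)))) ++ rest)
                      = stackW ((List.range r.length).map
                      (fun i => (pyMineur (r :: tl) i, p * r.getD i 0 * (-1 : Int) ^ (i + 2)))) + stackW rest := by
                    simp [stackW]
                  rw [loopBN_big h1 h2, ih _ _ (by omega),
                      List.foldl_append, recGoN_big h1 h2, List.foldl_map]
                  congr 1
                  apply foldl_congr_fun
                  intro i _ a
                  have hml : (pyMineur (r :: tl) i).length ≤ tl.length := by
                    have := pyMineur_length_le (r :: tl) i; simpa using this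
                  exact recGoN_congr _ _ _ a _ (by omega) (by simp only [List.length_cons]; omega)

-- ===== VERDICT (by name: the statement is the Claim_ definition above) =====
theorem recursion_spec : Claim_equal_recursion := by
  intro matrix somme prod _ _
  unfold Spec_recursion recursion recursion_alt
  rw [loopBN_eq_foldl _ _ _ (by simp [stackW])]
  simp
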